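-- pv_equiv track=rewrite | github.com/grlee77/pywt | pywt/tests/test_wp2d.py | _wavedec2_keys
-- ===== SOURCE A (Python) =====
-- def _wavedec2_keys(level):
--     # return wavelet packet keys corresponding to a wavedec2 decomposition
--     approx = ''
--     coeffs = {}
--     for lev in range(level):
--         for k in ['a', 'h', 'v', 'd']:
--             coeffs[approx + k] = None
--         approx = 'a' * (lev + 1)
--         if lev < level - 1:
--             coeffs.pop(approx)
--     return list(coeffs.keys())
-- ===== SOURCE B (Python) =====
-- def _wavedec2_keys(level):
--     # Stage 1: emit only the detail keys for every level, in one flat comprehension.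
--     keys = ['a' * lev + c for lev in range(level) for c in ['h', 'v', 'd']]
--     # Stage 2: splice the single approximation key in before the last detail block.
--     if level > 0:
--         keys.insert(len(keys) - 3, 'a' * level)
--     return keys
-- ===== Notes on version B (the rewrite author's own statement) =====
-- stated objective: simpler
-- what changed: Replaces the stateful dict insert-then-pop loop with two stages: one flat comprehension that emits only the detail keys of every level, then a single positional insert splicing the one approximation key in before the last detail block.
import Mathlib
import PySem

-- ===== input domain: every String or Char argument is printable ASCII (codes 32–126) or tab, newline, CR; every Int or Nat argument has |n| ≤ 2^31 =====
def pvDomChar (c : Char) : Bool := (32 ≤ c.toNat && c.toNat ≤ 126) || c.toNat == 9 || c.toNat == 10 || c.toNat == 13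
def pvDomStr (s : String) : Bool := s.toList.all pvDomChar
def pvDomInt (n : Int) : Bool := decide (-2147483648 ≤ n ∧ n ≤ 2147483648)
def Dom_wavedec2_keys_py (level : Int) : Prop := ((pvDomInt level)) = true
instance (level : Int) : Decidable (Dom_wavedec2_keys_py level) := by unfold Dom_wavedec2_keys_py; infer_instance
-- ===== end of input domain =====

-- B emits only the detail keys in one flat pass and splices the single approximation key in before the last block, instead of A's dict insert-then-pop loop; same values, simpler.

-- ===== PORT A =====
-- loop body of A, named so the proofs can talk about one iteration; it is a verbatim transliteration
def wavedec2_keys_py_step (level : Int) (st : String × PySem.Dict String (Option Unit)) (lev : Int) :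
    String × PySem.Dict String (Option Unit) :=
  -- for k in ['a', 'h', 'v', 'd']: coeffs[approx + k] = None
  let coeffs := ["a", "h", "v", "d"].foldl (fun c k => c.insert (st.1 ++ k) none) st.2
  -- approx = 'a' * (lev + 1)
  let approx := String.ofList (List.replicate (lev + 1).toNat 'a')
  if lev < level - 1 then
    match coeffs.pop? approx with
    | some (_, c') => (approx, c')
    | none => (approx, coeffs)  -- unreachable: the key was inserted just above, so pop cannot raise
  else (approx, coeffs)

def wavedec2_keys_py (level : Int) : List String :=
  ((PySem.List.pyRange 0 level 1).foldl (wavedec2_keys_py_step level)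
    ("", PySem.Dict.empty)).2.keys

-- ===== PORT B =====
-- stage 1 of Source B: the flat comprehension of detail keys (verbatim transliteration)
def wavedec2_keys_py_alt_details (level : Int) : List String :=
  (PySem.List.pyRange 0 level 1).flatMap (fun lev =>
    ["h", "v", "d"].map (fun c => String.ofList (List.replicate lev.toNat 'a') ++ c))

def wavedec2_keys_py_alt (level : Int) : List String :=
  let keys := wavedec2_keys_py_alt_details level
  -- stage 2: keys.insert(len(keys) - 3, 'a' * level)
  if 0 < level then
    PySem.List.insert keys ((keys.length : Int) - 3)
      (String.ofList (List.replicate level.toNat 'a'))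
  else keys

-- ===== PRECONDITION & SPEC =====
def Spec_wavedec2_keys_py (level : Int) (out : List String) : Prop := out = wavedec2_keys_py_alt level
instance (level : Int) (out : List String) : Decidable (Spec_wavedec2_keys_py level out) := by unfold Spec_wavedec2_keys_py; infer_instance

-- ===== CLAIM (what is proved, stated in full; the proofs are below) =====
def Claim_equal_wavedec2_keys_py : Prop := ∀ (level : Int), Dom_wavedec2_keys_py level → Spec_wavedec2_keys_py level (wavedec2_keys_py level)

-- ===== LEMMAS AND PROOFS =====

-- 'a' * m
def pvAK (m : Nat) : String := String.ofList (List.replicate m 'a')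

-- the dict items after m fully processed (popped) levels: the detail keys of levels 0..m-1
def pvItems : Nat → List (String × Option Unit)
  | 0 => []
  | m + 1 => pvItems m ++ [(pvAK m ++ "h", none), (pvAK m ++ "v", none), (pvAK m ++ "d", none)]

-- the common closed form: the final key list of a depth-(m+1) decomposition
def pvF (m : Nat) : List String :=
  (pvItems m).map (·.1) ++ [pvAK m ++ "a", pvAK m ++ "h", pvAK m ++ "v", pvAK m ++ "d"]

lemma pv_str_ext {s t : String} (h : s.toList = t.toList) : s = t := by
  have := congrArg String.ofList h
  simpa using this

lemma pv_toList_aK_append (m : Nat) (c : String) :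
    (pvAK m ++ c).toList = List.replicate m 'a' ++ c.toList := by
  simp [pvAK]

lemma pv_aK_succ (m : Nat) : pvAK m ++ "a" = pvAK (m + 1) := by
  apply pv_str_ext
  simp [pvAK, List.replicate_succ']

lemma pv_key_len {m : Nat} : ∀ p ∈ pvItems m, p.1.toList.length ≤ m := by
  induction m with
  | zero => simp [pvItems]
  | succ m ih =>
    intro p hp
    simp only [pvItems, List.mem_append] at hp
    rcases hp with hp | hp
    · exact le_trans (ih p hp) (Nat.le_succ m)
    · simp at hp
      rcases hp with rfl | rfl | rfl <;> simp [pvAK]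

lemma pv_items_ne {m : Nat} {p : String × Option Unit} (hp : p ∈ pvItems m)
    (c : String) (hc : c.toList.length = 1) : p.1 ≠ pvAK m ++ c := by
  intro h
  have h1 := pv_key_len p hp
  rw [h] at h1
  rw [pv_toList_aK_append] at h1
  simp [hc] at h1

lemma pv_letter_ne {m : Nat} {c c' : String} (h : c.toList ≠ c'.toList) :
    pvAK m ++ c ≠ pvAK m ++ c' := by
  intro he
  have := congrArg String.toList he
  rw [pv_toList_aK_append, pv_toList_aK_append] at this
  exact h (List.append_cancel_left this)

lemma pv_contains_mk_false {l : List (String × Option Unit)} {k : String}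
    (h : ∀ p ∈ l, p.1 ≠ k) : (PySem.Dict.mk l).contains k = false := by
  simp only [PySem.Dict.contains, List.any_eq_false]
  intro p hp
  simpa using h p hp

lemma pv_insert_fresh {l : List (String × Option Unit)} {k : String} (v : Option Unit)
    (h : ∀ p ∈ l, p.1 ≠ k) :
    (PySem.Dict.mk l).insert k v = PySem.Dict.mk (l ++ [(k, v)]) := by
  simp [PySem.Dict.insert, pv_contains_mk_false h]

lemma pv_get?_mk_append {l rest : List (String × Option Unit)} {k : String}
    (h : ∀ p ∈ l, p.1 ≠ k) :
    (PySem.Dict.mk (l ++ rest)).get? k = (PySem.Dict.mk rest).get? k := by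
  simp only [PySem.Dict.get?, List.find?_append]
  have hnone : l.find? (fun p => p.1 == k) = none := by
    rw [List.find?_eq_none]
    intro p hp
    simpa using h p hp
  simp [hnone]

lemma pv_insert_block (m : Nat) :
    ["a", "h", "v", "d"].foldl (fun c k => c.insert (pvAK m ++ k) none) (PySem.Dict.mk (pvItems m)) =
      PySem.Dict.mk (pvItems m ++
        [(pvAK m ++ "a", none), (pvAK m ++ "h", none), (pvAK m ++ "v", none), (pvAK m ++ "d", none)]) := by
  have hne : ∀ (c : String), c.toList.length = 1 → ∀ p ∈ pvItems m, p.1 ≠ pvAK m ++ c := by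
    intro c hc p hp; exact pv_items_ne hp c hc
  have hfa : ∀ p ∈ pvItems m, p.1 ≠ pvAK m ++ "a" := hne "a" (by decide)
  have hfh : ∀ p ∈ pvItems m ++ [(pvAK m ++ "a", none)], p.1 ≠ pvAK m ++ "h" := by
    intro p hp
    rcases List.mem_append.mp hp with hp | hp
    · exact hne "h" (by decide) p hp
    · simp at hp; subst hp; exact pv_letter_ne (by decide)
  have hfv : ∀ p ∈ (pvItems m ++ [(pvAK m ++ "a", none)]) ++ [(pvAK m ++ "h", none)],
      p.1 ≠ pvAK m ++ "v" := by
    intro p hp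
    rcases List.mem_append.mp hp with hp | hp
    · rcases List.mem_append.mp hp with hp' | hp'
      · exact hne "v" (by decide) p hp'
      · simp at hp'; subst hp'; exact pv_letter_ne (by decide)
    · simp at hp; subst hp; exact pv_letter_ne (by decide)
  have hfd : ∀ p ∈ ((pvItems m ++ [(pvAK m ++ "a", none)]) ++ [(pvAK m ++ "h", none)]) ++
      [(pvAK m ++ "v", none)], p.1 ≠ pvAK m ++ "d" := by
    intro p hp
    rcases List.mem_append.mp hp with hp | hp
    · rcases List.mem_append.mp hp with hp' | hp'
      · rcases List.mem_append.mp hp' with hp'' | hp''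
        · exact hne "d" (by decide) p hp''
        · simp at hp''; subst hp''; exact pv_letter_ne (by decide)
      · simp at hp'; subst hp'; exact pv_letter_ne (by decide)
    · simp at hp; subst hp; exact pv_letter_ne (by decide)
  simp only [List.foldl_cons, List.foldl_nil]
  rw [pv_insert_fresh none hfa, pv_insert_fresh none hfh, pv_insert_fresh none hfv,
    pv_insert_fresh none hfd]
  simp

lemma pv_aK_cast (m : Nat) :
    String.ofList (List.replicate ((m : Int) + 1).toNat 'a') = pvAK (m + 1) := by
  have h : ((m : Int) + 1).toNat = m + 1 := by omega
  rw [h]; rfl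

-- evaluating one iteration of A's loop at the invariant state
lemma pv_stepA_pop (level : Int) (m : Nat) (h : (m : Int) < level - 1) :
    wavedec2_keys_py_step level (pvAK m, PySem.Dict.mk (pvItems m)) (m : Int) =
      (pvAK (m + 1), PySem.Dict.mk (pvItems (m + 1))) := by
  unfold wavedec2_keys_py_step
  simp only [pv_insert_block, pv_aK_cast, if_pos h]
  have hget : (PySem.Dict.mk (pvItems m ++
      [(pvAK m ++ "a", none), (pvAK m ++ "h", none), (pvAK m ++ "v", none), (pvAK m ++ "d", none)])).get?
      (pvAK (m + 1)) = some none := by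
    rw [pv_get?_mk_append (fun p hp => by
      rw [← pv_aK_succ]; exact pv_items_ne hp "a" (by decide))]
    rw [← pv_aK_succ]
    simp [PySem.Dict.get?]
  have herase : (PySem.Dict.mk (pvItems m ++
      [(pvAK m ++ "a", none), (pvAK m ++ "h", none), (pvAK m ++ "v", none), (pvAK m ++ "d", none)])).erase
      (pvAK (m + 1)) = PySem.Dict.mk (pvItems (m + 1)) := by
    simp only [PySem.Dict.erase, List.filter_append]
    rw [← pv_aK_succ]
    have h1 : (pvItems m).filter (fun p => !(p.1 == pvAK m ++ "a")) = pvItems m := by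
      rw [List.filter_eq_self]
      intro p hp
      simpa using pv_items_ne hp "a" (by decide)
    rw [h1]
    have hh : ((pvAK m ++ "h") == (pvAK m ++ "a")) = false := by
      simpa using pv_letter_ne (m := m) (c := "h") (c' := "a") (by decide)
    have hv : ((pvAK m ++ "v") == (pvAK m ++ "a")) = false := by
      simpa using pv_letter_ne (m := m) (c := "v") (c' := "a") (by decide)
    have hd : ((pvAK m ++ "d") == (pvAK m ++ "a")) = false := by
      simpa using pv_letter_ne (m := m) (c := "d") (c' := "a") (by decide)
    have haa : ((pvAK m ++ "a") == (pvAK m ++ "a")) = true := by simp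
    simp [List.filter_cons, hh, hv, hd, haa, pvItems]
  simp [PySem.Dict.pop?, hget, herase]

lemma pv_stepA_last (level : Int) (m : Nat) (h : ¬ ((m : Int) < level - 1)) :
    wavedec2_keys_py_step level (pvAK m, PySem.Dict.mk (pvItems m)) (m : Int) =
      (pvAK (m + 1), PySem.Dict.mk (pvItems m ++
        [(pvAK m ++ "a", none), (pvAK m ++ "h", none), (pvAK m ++ "v", none), (pvAK m ++ "d", none)])) := by
  unfold wavedec2_keys_py_step
  simp only [pv_insert_block, pv_aK_cast, if_neg h]

-- A's loop invariant: after m popped levels the state is ('a'*m, the detail keys of levels < m)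
lemma pv_Astate (level : Int) : ∀ (m : Nat), (m : Int) < level →
    (PySem.List.pyRange 0 (m : Int) 1).foldl (wavedec2_keys_py_step level) ("", PySem.Dict.empty) =
      (pvAK m, PySem.Dict.mk (pvItems m)) := by
  intro m
  induction m with
  | zero =>
    intro _
    have h0 : pvAK 0 = "" := by decide
    simp [PySem.List.pyRange_one_eq_nil, pvItems, h0, PySem.Dict.empty]
  | succ m ih =>
    intro hm
    have hm' : (m : Int) < level := by push_cast at hm ⊢; omega
    have hpop : (m : Int) < level - 1 := by push_cast at hm; omega
    have hsplit : PySem.List.pyRange 0 ((m : Nat) + 1 : Nat) 1 =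
        PySem.List.pyRange 0 (m : Int) 1 ++ [(m : Int)] := by
      push_cast
      exact PySem.List.pyRange_one_succ_right (by positivity)
    rw [hsplit, List.foldl_append, ih hm', List.foldl_cons, List.foldl_nil,
      pv_stepA_pop level m hpop]

-- the detail keys of levels < m, as B's stage 1 produces them
lemma pv_items_keys (m : Nat) :
    wavedec2_keys_py_alt_details (m : Int) = (pvItems m).map (·.1) := by
  induction m with
  | zero =>
    simp [wavedec2_keys_py_alt_details, PySem.List.pyRange_one_eq_nil, pvItems]
  | succ m ih =>
    have hsplit : PySem.List.pyRange 0 ((m : Nat) + 1 : Nat) 1 =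
        PySem.List.pyRange 0 (m : Int) 1 ++ [(m : Int)] := by
      push_cast
      exact PySem.List.pyRange_one_succ_right (by positivity)
    unfold wavedec2_keys_py_alt_details at ih ⊢
    rw [hsplit, List.flatMap_append, ih]
    simp [pvItems, pvAK]

-- B's stage-1 list has three keys per level
lemma pv_details_length (m : Nat) :
    (wavedec2_keys_py_alt_details (m : Int)).length = 3 * m := by
  rw [pv_items_keys]
  induction m with
  | zero => simp [pvItems]
  | succ m ih => simp [pvItems, ih]; omega

-- B equals the closed form: stage 1 for level m+1 then the splice at position 3m
lemma pv_alt_eq (m : Nat) : wavedec2_keys_py_alt ((m + 1 : Nat) : Int) = pvF m := by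
  unfold wavedec2_keys_py_alt
  have hpos : (0 : Int) < ((m + 1 : Nat) : Int) := by positivity
  rw [if_pos hpos]
  have hkeys : wavedec2_keys_py_alt_details ((m + 1 : Nat) : Int) =
      (pvItems m).map (·.1) ++ [pvAK m ++ "h", pvAK m ++ "v", pvAK m ++ "d"] := by
    rw [pv_items_keys]
    simp [pvItems]
  have hlen : (wavedec2_keys_py_alt_details ((m + 1 : Nat) : Int)).length = 3 * (m + 1) :=
    pv_details_length (m + 1)
  have hidx : ((wavedec2_keys_py_alt_details ((m + 1 : Nat) : Int)).length : Int) - 3 =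
      ((3 * m : Nat) : Int) := by rw [hlen]; push_cast; ring
  have haK : String.ofList (List.replicate ((m + 1 : Nat) : Int).toNat 'a') = pvAK (m + 1) := by
    have h : (((m + 1 : Nat) : Int)).toNat = m + 1 := by omega
    rw [h]; rfl
  rw [hidx, haK, PySem.List.insert_natCast _ _ _ (by omega), hkeys]
  have hitems_len : ((pvItems m).map (·.1)).length = 3 * m := by
    have := pv_details_length m
    rw [pv_items_keys] at this
    exact this
  rw [List.take_append_of_le_length (by omega), List.drop_append_of_le_length (by omega)]
  rw [← hitems_len, List.take_length, List.drop_length]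
  unfold pvF
  rw [← pv_aK_succ]
  simp

-- ===== VERDICT (by name: the statement is the Claim_ definition above) =====
theorem wavedec2_keys_py_spec : Claim_equal_wavedec2_keys_py := by
  unfold Claim_equal_wavedec2_keys_py
  intro level _
  unfold Spec_wavedec2_keys_py
  by_cases hle : level ≤ 0
  · unfold wavedec2_keys_py wavedec2_keys_py_alt wavedec2_keys_py_alt_details
    rw [PySem.List.pyRange_one_eq_nil hle, if_neg (by omega : ¬ (0 : Int) < level)]
    simp [PySem.Dict.empty, PySem.Dict.keys]
  · -- level ≥ 1; write level = m+1 and compare both sides with the closed form pvF m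
    set m : Nat := level.toNat - 1 with hm
    have hmi : ((m + 1 : Nat) : Int) = level := by omega
    -- A's side
    have hA : wavedec2_keys_py level = pvF m := by
      unfold wavedec2_keys_py
      have hsplit : PySem.List.pyRange 0 level 1 =
          PySem.List.pyRange 0 (level - 1) 1 ++ [level - 1] := by
        have := PySem.List.pyRange_one_succ_right (a := 0) (b := level - 1) (by omega)
        simpa using this
      rw [hsplit, List.foldl_append]
      have hmi' : (m : Int) = level - 1 := by omega
      rw [← hmi', pv_Astate level m (by omega)]
      rw [List.foldl_cons, List.foldl_nil, pv_stepA_last level m (by omega)]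
      simp [PySem.Dict.keys, pvF]
    -- B's side
    have hB : wavedec2_keys_py_alt level = pvF m := by
      rw [← hmi]
      exact pv_alt_eq m
    rw [hA, hB]
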